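-- pv_equiv track=rewrite | github.com/ym001/bb84 | reconciliation.py | construction_Bit_De_Parite_Hamming
-- ===== SOURCE A (Python) =====
-- def multiplication_Matrice(m1, m2):
-- 	m = []
-- 	for i in range(len(m1)):
-- 		element =0
-- 		for j in range(len(m1[0])):
-- 			element = (element +m1[i][j]*m2[j])%2
-- 		m.append(element)
-- 	return m
--
-- def construction_Bit_De_Parite_Hamming(ma,mb):
-- 	lparite=[]
-- 	matrice_generatrice=[[1,1,0,1],[1,0,1,1],[1,0,0,0],[0,1,1,1],[0,1,0,0],[0,0,1,0],[0,0,0,1]]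
-- 	for i in range(0,len(ma)):
-- 		lparite=multiplication_Matrice(matrice_generatrice, ma[i])
-- 		d0=mb[i][0]#bit transmis p_1 p_2 d_1 p_3 d_2 d_3 d_4
-- 		d1=mb[i][1]
-- 		d2=mb[i][2]
-- 		d3=mb[i][3]
-- 		lp=[lparite[0],lparite[1],d0,lparite[3],d1,d2,d3]#alice transmet les bits de parité à bob sans erreur
-- 		mb[i]=lp
--
-- 	return mb
-- ===== SOURCE B (Python) =====
-- def construction_Bit_De_Parite_Hamming(ma, mb):
--     for i in range(len(ma)):
--         a = ma[i]
--         p1 = (a[0] + a[1] + a[3]) % 2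
--         p2 = (a[0] + a[2] + a[3]) % 2
--         p3 = (a[1] + a[2] + a[3]) % 2
--         b = mb[i]
--         mb[i] = [p1, p2, b[0], p3, b[1], b[2], b[3]]
--     return mb
-- ===== Notes on version B (the rewrite author's own statement) =====
-- stated objective: simpler
-- what changed: Replaces the generic 7x4 matrix-vector multiply helper (nested loops, 3 of the 7 computed values unused) with three closed-form XOR-sum parity bits computed directly per block.
import Mathlib
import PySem

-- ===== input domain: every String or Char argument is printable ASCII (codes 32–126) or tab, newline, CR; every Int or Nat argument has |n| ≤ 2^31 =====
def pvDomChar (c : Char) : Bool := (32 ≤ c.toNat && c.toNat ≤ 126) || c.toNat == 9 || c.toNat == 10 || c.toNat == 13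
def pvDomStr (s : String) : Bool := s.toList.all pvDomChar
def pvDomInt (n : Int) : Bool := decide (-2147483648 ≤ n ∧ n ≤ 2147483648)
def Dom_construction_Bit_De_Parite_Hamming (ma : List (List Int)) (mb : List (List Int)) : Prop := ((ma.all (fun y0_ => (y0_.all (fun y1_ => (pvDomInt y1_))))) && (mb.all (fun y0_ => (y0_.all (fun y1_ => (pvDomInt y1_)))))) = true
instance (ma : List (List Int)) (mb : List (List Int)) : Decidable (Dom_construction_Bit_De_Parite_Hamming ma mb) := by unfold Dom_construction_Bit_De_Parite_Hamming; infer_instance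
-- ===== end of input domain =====

-- B replaces A's generic 7x4 matrix-vector multiply helper with three closed-form
-- per-block parity bits (simpler). Python A/B mutate mb in place; the equivalence
-- proved here is about the returned value (both perform the same mutation).

-- ===== PORT A =====
def multiplication_Matrice (m1 : List (List Int)) (m2 : List Int) : List Int :=
  (PySem.List.pyRange 0 (m1.length : Int) 1).foldl (fun m i =>
    let element :=
      (PySem.List.pyRange 0 ((PySem.List.pyGetD m1 0 []).length : Int) 1).foldl
        (fun element j =>
          PySem.Int.mod (element + PySem.List.pyGetD (PySem.List.pyGetD m1 i []) j 0 * PySem.List.pyGetD m2 j 0) 2)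
        0
    m ++ [element]) []

def construction_Bit_De_Parite_Hamming (ma : List (List Int)) (mb : List (List Int)) : List (List Int) :=
  let matrice_generatrice : List (List Int) :=
    [[1,1,0,1],[1,0,1,1],[1,0,0,0],[0,1,1,1],[0,1,0,0],[0,0,1,0],[0,0,0,1]]
  (PySem.List.pyRange 0 (ma.length : Int) 1).foldl (fun mbs i =>
    let lparite := multiplication_Matrice matrice_generatrice (PySem.List.pyGetD ma i [])
    let d0 := PySem.List.pyGetD (PySem.List.pyGetD mbs i []) 0 0
    let d1 := PySem.List.pyGetD (PySem.List.pyGetD mbs i []) 1 0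
    let d2 := PySem.List.pyGetD (PySem.List.pyGetD mbs i []) 2 0
    let d3 := PySem.List.pyGetD (PySem.List.pyGetD mbs i []) 3 0
    let lp := [PySem.List.pyGetD lparite 0 0, PySem.List.pyGetD lparite 1 0, d0,
               PySem.List.pyGetD lparite 3 0, d1, d2, d3]
    PySem.List.pySetD mbs i lp) mb

-- ===== PORT B =====
def construction_Bit_De_Parite_Hamming_alt (ma : List (List Int)) (mb : List (List Int)) : List (List Int) :=
  (PySem.List.pyRange 0 (ma.length : Int) 1).foldl (fun mbs i =>
    let a := PySem.List.pyGetD ma i []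
    let p1 := PySem.Int.mod (PySem.List.pyGetD a 0 0 + PySem.List.pyGetD a 1 0 + PySem.List.pyGetD a 3 0) 2
    let p2 := PySem.Int.mod (PySem.List.pyGetD a 0 0 + PySem.List.pyGetD a 2 0 + PySem.List.pyGetD a 3 0) 2
    let p3 := PySem.Int.mod (PySem.List.pyGetD a 1 0 + PySem.List.pyGetD a 2 0 + PySem.List.pyGetD a 3 0) 2
    let b := PySem.List.pyGetD mbs i []
    PySem.List.pySetD mbs i
      [p1, p2, PySem.List.pyGetD b 0 0, p3, PySem.List.pyGetD b 1 0,
       PySem.List.pyGetD b 2 0, PySem.List.pyGetD b 3 0]) mb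

-- ===== PRECONDITION & SPEC =====
-- Pre_ excludes exactly the inputs on which Python A raises IndexError: it reads
-- ma[i][0..3] and mb[i][0..3] for every i < len(ma).
def Pre_construction_Bit_De_Parite_Hamming (ma : List (List Int)) (mb : List (List Int)) : Prop :=
  ma.length ≤ mb.length ∧ (∀ r ∈ ma, 4 ≤ r.length) ∧ (∀ r ∈ mb.take ma.length, 4 ≤ r.length)
instance (ma : List (List Int)) (mb : List (List Int)) : Decidable (Pre_construction_Bit_De_Parite_Hamming ma mb) := by unfold Pre_construction_Bit_De_Parite_Hamming; infer_instance

def pvWitness_construction_Bit_De_Parite_Hamming : List (List Int) × List (List Int) :=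
  ([[1,0,1,1]], [[1,1,0,0]])

def Spec_construction_Bit_De_Parite_Hamming (ma : List (List Int)) (mb : List (List Int)) (out : List (List Int)) : Prop := out = construction_Bit_De_Parite_Hamming_alt ma mb
instance (ma : List (List Int)) (mb : List (List Int)) (out : List (List Int)) : Decidable (Spec_construction_Bit_De_Parite_Hamming ma mb out) := by unfold Spec_construction_Bit_De_Parite_Hamming; infer_instance

-- ===== CLAIM (what is proved, stated in full; the proofs are below) =====
def Claim_equal_construction_Bit_De_Parite_Hamming : Prop := ∀ (ma : List (List Int)) (mb : List (List Int)), Dom_construction_Bit_De_Parite_Hamming ma mb → Pre_construction_Bit_De_Parite_Hamming ma mb → Spec_construction_Bit_De_Parite_Hamming ma mb (construction_Bit_De_Parite_Hamming ma mb)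

-- ===== LEMMAS AND PROOFS =====

-- The 7x4 generator-matrix product, evaluated row by row.
lemma multMat_gen (a : List Int) :
    multiplication_Matrice [[1,1,0,1],[1,0,1,1],[1,0,0,0],[0,1,1,1],[0,1,0,0],[0,0,1,0],[0,0,0,1]] a =
    [PySem.Int.mod (PySem.List.pyGetD a 0 0 + PySem.List.pyGetD a 1 0 + PySem.List.pyGetD a 3 0) 2,
     PySem.Int.mod (PySem.List.pyGetD a 0 0 + PySem.List.pyGetD a 2 0 + PySem.List.pyGetD a 3 0) 2,
     PySem.Int.mod (PySem.List.pyGetD a 0 0) 2,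
     PySem.Int.mod (PySem.List.pyGetD a 1 0 + PySem.List.pyGetD a 2 0 + PySem.List.pyGetD a 3 0) 2,
     PySem.Int.mod (PySem.List.pyGetD a 1 0) 2,
     PySem.Int.mod (PySem.List.pyGetD a 2 0) 2,
     PySem.Int.mod (PySem.List.pyGetD a 3 0) 2] := by
  have h2 : ∀ x : Int, PySem.Int.mod x 2 = x % 2 := fun x =>
    PySem.Int.mod_eq_emod_of_pos (by norm_num)
  have h7 : PySem.List.pyRange 0 ((([[1,1,0,1],[1,0,1,1],[1,0,0,0],[0,1,1,1],[0,1,0,0],[0,0,1,0],[0,0,0,1]] : List (List Int)).length : Int)) 1 = [0,1,2,3,4,5,6] := by decide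
  have h4 : PySem.List.pyRange 0 (((PySem.List.pyGetD ([[1,1,0,1],[1,0,1,1],[1,0,0,0],[0,1,1,1],[0,1,0,0],[0,0,1,0],[0,0,0,1]] : List (List Int)) 0 []).length : Int)) 1 = [0,1,2,3] := by decide
  simp only [multiplication_Matrice, h7, h4, List.foldl_cons, List.foldl_nil]
  generalize PySem.List.pyGetD a 0 0 = a0
  generalize PySem.List.pyGetD a 1 0 = a1
  generalize PySem.List.pyGetD a 2 0 = a2
  generalize PySem.List.pyGetD a 3 0 = a3
  have t2 : Int.toNat 2 = 2 := rfl
  have t3 : Int.toNat 3 = 3 := rfl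
  have t4 : Int.toNat 4 = 4 := rfl
  have t5 : Int.toNat 5 = 5 := rfl
  have t6 : Int.toNat 6 = 6 := rfl
  norm_num [PySem.List.pyGetD, PySem.List.pyGet?, PySem.List.pyIdx?, h2, t2, t3, t4, t5, t6,
    List.getElem?_cons_zero, List.getElem?_cons_succ, List.getElem_cons_zero, List.getElem_cons_succ]


-- The two per-index loop bodies coincide on every state.
lemma step_eq (ma : List (List Int)) (mbs : List (List Int)) (i : Int) :
    (let lparite := multiplication_Matrice
        [[1,1,0,1],[1,0,1,1],[1,0,0,0],[0,1,1,1],[0,1,0,0],[0,0,1,0],[0,0,0,1]]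
        (PySem.List.pyGetD ma i [])
     PySem.List.pySetD mbs i
       [PySem.List.pyGetD lparite 0 0, PySem.List.pyGetD lparite 1 0,
        PySem.List.pyGetD (PySem.List.pyGetD mbs i []) 0 0,
        PySem.List.pyGetD lparite 3 0,
        PySem.List.pyGetD (PySem.List.pyGetD mbs i []) 1 0,
        PySem.List.pyGetD (PySem.List.pyGetD mbs i []) 2 0,
        PySem.List.pyGetD (PySem.List.pyGetD mbs i []) 3 0]) =
    (let a := PySem.List.pyGetD ma i []
     PySem.List.pySetD mbs i
       [PySem.Int.mod (PySem.List.pyGetD a 0 0 + PySem.List.pyGetD a 1 0 + PySem.List.pyGetD a 3 0) 2,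
        PySem.Int.mod (PySem.List.pyGetD a 0 0 + PySem.List.pyGetD a 2 0 + PySem.List.pyGetD a 3 0) 2,
        PySem.List.pyGetD (PySem.List.pyGetD mbs i []) 0 0,
        PySem.Int.mod (PySem.List.pyGetD a 1 0 + PySem.List.pyGetD a 2 0 + PySem.List.pyGetD a 3 0) 2,
        PySem.List.pyGetD (PySem.List.pyGetD mbs i []) 1 0,
        PySem.List.pyGetD (PySem.List.pyGetD mbs i []) 2 0,
        PySem.List.pyGetD (PySem.List.pyGetD mbs i []) 3 0]) := by
  simp [multMat_gen, PySem.List.pyGetD, PySem.List.pyGet?, PySem.List.pyIdx?]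

-- ===== VERDICT (by name: the statement is the Claim_ definition above) =====
theorem construction_Bit_De_Parite_Hamming_spec : Claim_equal_construction_Bit_De_Parite_Hamming := by
  intro ma mb _ _
  unfold Spec_construction_Bit_De_Parite_Hamming
  unfold construction_Bit_De_Parite_Hamming construction_Bit_De_Parite_Hamming_alt
  have hfun :
      (fun (mbs : List (List Int)) (i : Int) =>
        let lparite := multiplication_Matrice
          [[1,1,0,1],[1,0,1,1],[1,0,0,0],[0,1,1,1],[0,1,0,0],[0,0,1,0],[0,0,0,1]]
          (PySem.List.pyGetD ma i [])
        let d0 := PySem.List.pyGetD (PySem.List.pyGetD mbs i []) 0 0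
        let d1 := PySem.List.pyGetD (PySem.List.pyGetD mbs i []) 1 0
        let d2 := PySem.List.pyGetD (PySem.List.pyGetD mbs i []) 2 0
        let d3 := PySem.List.pyGetD (PySem.List.pyGetD mbs i []) 3 0
        let lp := [PySem.List.pyGetD lparite 0 0, PySem.List.pyGetD lparite 1 0, d0,
                   PySem.List.pyGetD lparite 3 0, d1, d2, d3]
        PySem.List.pySetD mbs i lp) =
      (fun (mbs : List (List Int)) (i : Int) =>
        let a := PySem.List.pyGetD ma i []
        let p1 := PySem.Int.mod (PySem.List.pyGetD a 0 0 + PySem.List.pyGetD a 1 0 + PySem.List.pyGetD a 3 0) 2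
        let p2 := PySem.Int.mod (PySem.List.pyGetD a 0 0 + PySem.List.pyGetD a 2 0 + PySem.List.pyGetD a 3 0) 2
        let p3 := PySem.Int.mod (PySem.List.pyGetD a 1 0 + PySem.List.pyGetD a 2 0 + PySem.List.pyGetD a 3 0) 2
        let b := PySem.List.pyGetD mbs i []
        PySem.List.pySetD mbs i
          [p1, p2, PySem.List.pyGetD b 0 0, p3, PySem.List.pyGetD b 1 0,
           PySem.List.pyGetD b 2 0, PySem.List.pyGetD b 3 0]) := by
    funext mbs i
    exact step_eq ma mbs i
  simp only [hfun]
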